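-- pv_equiv track=rewrite | github.com/ItamarRocha/DailyByte | week_009/day63_movingbricks.py | moving_bricks
-- ===== SOURCE A (Python) =====
-- def moving_bricks(bricks):
--     bricks.sort()
--
--     total_sum = 0
--     counter = 0
--     i = 0
--
--     while i < len(bricks):
--         if total_sum + bricks[i] >= 5000:
--             return counter
--
--         total_sum += bricks[i]
--         counter += 1
--         i+=1
--
--     return counter
-- ===== SOURCE B (Python) =====
-- def moving_bricks(bricks):
--     bricks.sort()
--     # stage 1: prefix-sum table
--     cumsum = []
--     t = 0
--     for b in bricks:
--         t += b
--         cumsum.append(t)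
--     # stage 2: binary search for the first prefix sum >= 5000
--     # (the predicate "prefix sum >= 5000" is monotone along a sorted list:
--     # once a prefix sum reaches 5000 > 0 the largest brick so far is positive,
--     # so every later brick is positive and the sums keep growing)
--     lo, hi = 0, len(cumsum)
--     while lo < hi:
--         mid = (lo + hi) // 2
--         if cumsum[mid] < 5000:
--             lo = mid + 1
--         else:
--             hi = mid
--     return lo
-- ===== Notes on version B (the rewrite author's own statement) =====
-- stated objective: alternative
-- what changed: Replaces A's greedy linear accumulation with early exit by two staged passes: build the full prefix-sum table, then binary-search it for the first prefix sum >= 5000 (the predicate is monotone along the sorted list).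
import Mathlib
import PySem

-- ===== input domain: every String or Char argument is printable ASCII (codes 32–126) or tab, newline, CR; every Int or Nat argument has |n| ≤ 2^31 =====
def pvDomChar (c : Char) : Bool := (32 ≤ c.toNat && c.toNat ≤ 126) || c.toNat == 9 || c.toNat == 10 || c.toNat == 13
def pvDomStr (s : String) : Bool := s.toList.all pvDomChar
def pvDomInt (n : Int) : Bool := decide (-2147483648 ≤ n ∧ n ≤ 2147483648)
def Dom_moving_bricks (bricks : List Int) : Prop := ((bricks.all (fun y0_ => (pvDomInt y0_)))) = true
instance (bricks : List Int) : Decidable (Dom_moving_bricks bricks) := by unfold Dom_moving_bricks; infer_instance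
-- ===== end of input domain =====

-- B replaces A's greedy accumulation with early exit by two staged passes: a full
-- prefix-sum table, then a binary search for the first prefix sum >= 5000.
-- Both sort the list in place; the equivalence proved is about the return value.

-- ===== PORT A =====
-- A's while loop over the sorted list: state (total_sum, counter), early return on >= 5000.
def mbLoopA : List Int → Int → Int → Int
  | [], _, counter => counter
  | b :: rest, total_sum, counter =>
      if total_sum + b ≥ 5000 then counter
      else mbLoopA rest (total_sum + b) (counter + 1)

def moving_bricks (bricks : List Int) : Int :=
  mbLoopA (PySem.List.sorted bricks (fun x => x)) 0 0

-- ===== PORT B =====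
-- Source B's first pass: t += b; cumsum.append(t).
def mbAccum : Int → List Int → List Int
  | _, [] => []
  | t, x :: xs => (t + x) :: mbAccum (t + x) xs

-- Source B's while loop: lo/hi are nonnegative ints with lo ≤ hi ≤ len(cumsum), so Nat with
-- Nat division matches Python's // and cumsum[mid] (mid < len) is List.getD mid 0.
def mbSearch (cumsum : List Int) (lo hi : Nat) : Nat :=
  if lo < hi then
    let mid := (lo + hi) / 2
    if cumsum.getD mid 0 < 5000 then mbSearch cumsum (mid + 1) hi
    else mbSearch cumsum lo mid
  else lo
termination_by hi - lo
decreasing_by all_goals omega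

def moving_bricks_alt (bricks : List Int) : Int :=
  let cumsum := mbAccum 0 (PySem.List.sorted bricks (fun x => x))
  ((mbSearch cumsum 0 cumsum.length : Nat) : Int)

-- ===== PRECONDITION & SPEC =====
def Spec_moving_bricks (bricks : List Int) (out : Int) : Prop := out = moving_bricks_alt bricks
instance (bricks : List Int) (out : Int) : Decidable (Spec_moving_bricks bricks out) := by unfold Spec_moving_bricks; infer_instance

-- ===== CLAIM (what is proved, stated in full; the proofs are below) =====
def Claim_equal_moving_bricks : Prop := ∀ (bricks : List Int), Dom_moving_bricks bricks → Spec_moving_bricks bricks (moving_bricks bricks)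

-- ===== LEMMAS AND PROOFS =====

-- A's loop counts the prefix sums strictly below 5000.
theorem mbLoopA_eq_takeWhile (xs : List Int) : ∀ (t c : Int),
    mbLoopA xs t c = c + (((mbAccum t xs).takeWhile (fun s => s < 5000)).length : Int) := by
  induction xs with
  | nil => intro t c; simp [mbLoopA, mbAccum]
  | cons x rest ih =>
      intro t c
      by_cases h : t + x ≥ 5000
      · simp [mbLoopA, mbAccum, h]
      · have hlt : t + x < 5000 := by omega
        simp [mbLoopA, mbAccum, h, hlt, ih]
        omega

theorem mbAccum_length (xs : List Int) : ∀ t, (mbAccum t xs).length = xs.length := by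
  induction xs with
  | nil => intro t; simp [mbAccum]
  | cons x rest ih => intro t; simp [mbAccum, ih]

theorem mbAccum_getD (xs : List Int) : ∀ (i : Nat) (t : Int), i < xs.length →
    (mbAccum t xs).getD i 0 = t + (xs.take (i + 1)).sum := by
  induction xs with
  | nil => intro i t h; simp at h
  | cons x rest ih =>
      intro i t h
      cases i with
      | zero => simp [mbAccum]
      | succ j =>
          have hj : j < rest.length := by simpa using h
          rw [show mbAccum t (x :: rest) = (t + x) :: mbAccum (t + x) rest from rfl,
              List.getD_cons_succ, ih j (t + x) hj, List.take_succ_cons, List.sum_cons]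
          ring

-- partial sums of a sorted list are bounded by (i+1) * (its i-th element)
theorem take_sum_le (ys : List Int)
    (hs : ∀ (p q : Nat) (hpq : p ≤ q) (hq : q < ys.length),
      ys[p]'(Nat.lt_of_le_of_lt hpq hq) ≤ ys[q]) :
    ∀ i : Nat, (hi : i < ys.length) → (ys.take (i + 1)).sum ≤ (i + 1 : Int) * ys[i] := by
  intro i
  induction i with
  | zero =>
      intro hi
      simp [List.sum_take_succ ys 0 hi]
  | succ j ihj =>
      intro hi
      have hj : j < ys.length := by omega
      have h1 : (ys.take (j + 1)).sum ≤ (j + 1 : Int) * ys[j] := ihj hj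
      have h2 : ys[j] ≤ ys[j+1] := hs j (j+1) (by omega) hi
      have h3 : (ys.take (j + 2)).sum = (ys.take (j + 1)).sum + ys[j+1] :=
        List.sum_take_succ ys (j+1) hi
      have h4 : (j + 1 : Int) * ys[j] ≤ (j + 1 : Int) * ys[j+1] := by
        have : (0 : Int) ≤ (j + 1 : Int) := by positivity
        exact mul_le_mul_of_nonneg_left h2 this
      have h5 : (ys.take (j + 1 + 1)).sum ≤ (j + 1 : Int) * ys[j+1] + ys[j+1] := by
        rw [h3]; push_cast at h1 h4 ⊢; linarith
      have h6 : (j + 1 : Int) * ys[j+1] + ys[j+1] = (j + 1 + 1 : Int) * ys[j+1] := by ring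
      push_cast
      linarith

-- along a sorted list, "prefix sum ≥ 5000" is monotone in the index
theorem take_sum_mono (ys : List Int)
    (hs : ∀ (p q : Nat) (hpq : p ≤ q) (hq : q < ys.length),
      ys[p]'(Nat.lt_of_le_of_lt hpq hq) ≤ ys[q]) :
    ∀ i j : Nat, i ≤ j → (hj : j < ys.length) →
      (5000 : Int) ≤ (ys.take (i + 1)).sum → (5000 : Int) ≤ (ys.take (j + 1)).sum := by
  intro i j hij
  induction j with
  | zero =>
      intro hj h5
      have hi0 : i = 0 := Nat.le_zero.mp hij
      simpa [hi0] using h5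
  | succ k ihk =>
      intro hj h5
      by_cases hik : i ≤ k
      · have hk : k < ys.length := by omega
        have hSk : (5000 : Int) ≤ (ys.take (k + 1)).sum := ihk hik hk h5
        have hbound := take_sum_le ys hs k hk
        have hpos : (1 : Int) ≤ ys[k] := by
          by_contra hcon
          have hle : ys[k] ≤ 0 := by omega
          have hp1 : ((k : Int) + 1) * ys[k] ≤ 0 :=
            mul_nonpos_of_nonneg_of_nonpos (by positivity) hle
          push_cast at hbound
          linarith
        have h2 : ys[k] ≤ ys[k+1] := hs k (k+1) (by omega) hj
        have h3 : (ys.take (k + 1 + 1)).sum = (ys.take (k + 1)).sum + ys[k+1] :=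
          List.sum_take_succ ys (k+1) hj
        linarith
      · have : i = k + 1 := by omega
        subst this; exact h5

-- characterisation of the takeWhile count
theorem takeWhile_len_le (l : List Int) :
    (l.takeWhile (fun s => s < 5000)).length ≤ l.length := by
  exact (List.takeWhile_sublist _).length_le

theorem takeWhile_lt (l : List Int) :
    ∀ i : Nat, i < (l.takeWhile (fun s => s < 5000)).length → l.getD i 0 < 5000 := by
  induction l with
  | nil => intro i h; simp at h
  | cons x rest ih =>
      intro i h
      by_cases hx : x < 5000
      · cases i with
        | zero => simpa using hx
        | succ j =>
            simp [hx] at h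
            simpa using ih j (by omega)
      · simp [hx] at h

theorem takeWhile_ge (l : List Int) :
    (l.takeWhile (fun s => s < 5000)).length < l.length →
      (5000 : Int) ≤ l.getD (l.takeWhile (fun s => s < 5000)).length 0 := by
  induction l with
  | nil => intro h; simp at h
  | cons x rest ih =>
      intro h
      by_cases hx : x < 5000
      · simp [hx] at h ⊢
        exact ih (by omega)
      · simp [hx]
        omega

-- binary-search correctness: with a monotone cutoff predicate, mbSearch returns the
-- takeWhile count
theorem mbSearch_eq (cum : List Int)
    (hmono : ∀ i j : Nat, i ≤ j → j < cum.length →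
        (5000 : Int) ≤ cum.getD i 0 → (5000 : Int) ≤ cum.getD j 0) :
    ∀ (k lo hi : Nat), hi - lo = k → lo ≤ hi → hi ≤ cum.length →
      (∀ i : Nat, i < lo → cum.getD i 0 < 5000) →
      (∀ i : Nat, hi ≤ i → i < cum.length → (5000 : Int) ≤ cum.getD i 0) →
      mbSearch cum lo hi = (cum.takeWhile (fun s => s < 5000)).length := by
  intro k
  induction k using Nat.strong_induction_on with
  | _ k ih =>
      intro lo hi hk hlh hhn hlow hhigh
      by_cases h : lo < hi
      · rw [mbSearch]
        simp only [h, if_true]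
        set mid := (lo + hi) / 2 with hmid
        have hm1 : lo ≤ mid := by omega
        have hm2 : mid < hi := by omega
        by_cases hc : cum.getD mid 0 < 5000
        · simp only [hc, if_true]
          exact ih (hi - (mid + 1)) (by omega) (mid + 1) hi rfl (by omega) hhn
            (by
              intro i hi'
              by_cases hi2 : i < lo
              · exact hlow i hi2
              · -- i ≤ mid : if S i ≥ 5000 then S mid ≥ 5000, contradiction
                by_contra hcon
                have : (5000 : Int) ≤ cum.getD i 0 := by omega
                have := hmono i mid (by omega) (by omega) this
                omega)
            hhigh
        · simp only [hc, if_false]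
          exact ih (mid - lo) (by omega) lo mid rfl (by omega) (by omega) hlow
            (by
              intro i hi1 hi2
              exact hmono mid i (by omega) hi2 (by omega))
      · rw [mbSearch]
        simp only [h, if_false]
        have hlo : lo = hi := by omega
        subst hlo
        -- lo is exactly the takeWhile count
        set t := (cum.takeWhile (fun s => s < 5000)).length with ht
        have htle := takeWhile_len_le cum
        by_cases h1 : t < lo
        · exfalso
          have hg := takeWhile_ge cum (by omega)
          rw [← ht] at hg
          have hl := hlow t h1
          omega
        · by_cases h2 : lo < t
          · exfalso
            have := takeWhile_lt cum lo (by omega)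
            have := hhigh lo (le_refl _) (by omega)
            omega
          · omega

-- ===== VERDICT (by name: the statement is the Claim_ definition above) =====
theorem moving_bricks_spec : Claim_equal_moving_bricks := by
  intro bricks _
  unfold Spec_moving_bricks moving_bricks moving_bricks_alt
  set ys := PySem.List.sorted bricks (fun x => x) with hys
  set cum := mbAccum 0 ys with hcum
  have hlen : cum.length = ys.length := mbAccum_length ys 0
  have hsorted : ∀ (p q : Nat) (hpq : p ≤ q) (hq : q < ys.length),
      ys[p]'(Nat.lt_of_le_of_lt hpq hq) ≤ ys[q] := by
    intro p q hpq hq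
    exact PySem.List.sorted_id_getElem_mono bricks hpq (by simpa [hys] using hq)
  have hgetD : ∀ i : Nat, i < cum.length → cum.getD i 0 = (ys.take (i + 1)).sum := by
    intro i hi
    have := mbAccum_getD ys i 0 (by omega)
    simpa using this
  have hmono : ∀ i j : Nat, i ≤ j → j < cum.length →
      (5000 : Int) ≤ cum.getD i 0 → (5000 : Int) ≤ cum.getD j 0 := by
    intro i j hij hj h5
    rw [hgetD j hj]
    rw [hgetD i (by omega)] at h5
    exact take_sum_mono ys hsorted i j hij (by omega) h5
  have hsearch := mbSearch_eq cum hmono cum.length 0 cum.length rfl (by omega) (le_refl _)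
    (by intro i hi; omega) (by intro i hi1 hi2; omega)
  rw [mbLoopA_eq_takeWhile ys 0 0]
  change (0 : Int) + ((List.takeWhile (fun s => decide (s < 5000)) cum).length : Int)
      = ((mbSearch cum 0 cum.length : Nat) : Int)
  rw [hsearch]
  omega
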